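-- pv_equiv track=rewrite | github.com/darinmoore/aoc-2023 | day1/day1.py | parse_digits
-- ===== SOURCE A (Python) =====
-- WORD_TO_DIGIT = {
--     "one" : "1",
--     "two" : "2",
--     "three" : "3",
--     "four" : "4",
--     "five" : "5",
--     "six" : "6",
--     "seven" : "7",
--     "eight" : "8",
--     "nine" : "9"
-- }
--
-- def parse_digits(line):
--     digits = ""
--     for i in range(len(line)):
--         char = line[i]
--         if char.isdigit():
--             digits += char
--         else:
--             for word in WORD_TO_DIGIT.keys():
--                 if line[i:].startswith(word):
--                     digits += WORD_TO_DIGIT[word]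
--
--     return digits
-- ===== SOURCE B (Python) =====
-- import re
--
-- WORD_TO_DIGIT = {
--     "one" : "1",
--     "two" : "2",
--     "three" : "3",
--     "four" : "4",
--     "five" : "5",
--     "six" : "6",
--     "seven" : "7",
--     "eight" : "8",
--     "nine" : "9"
-- }
--
-- # One precompiled zero-width lookahead so overlapping words ("twone") all count.
-- _SCAN = re.compile(r"(?=([0-9]|one|two|three|four|five|six|seven|eight|nine))")
--
-- def parse_digits(line):
--     return "".join(WORD_TO_DIGIT.get(g, g)
--                    for g in (m.group(1) for m in _SCAN.finditer(line)))
-- ===== Notes on version B (the rewrite author's own statement) =====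
-- stated objective: idiomatic
-- what changed: Replaced the hand-written per-index loop that rescans the nine spelled words with startswith at every position by a single precompiled zero-width-lookahead regex, scanned once with re.finditer and joined via a dict lookup with the matched text as default.
import Mathlib
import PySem

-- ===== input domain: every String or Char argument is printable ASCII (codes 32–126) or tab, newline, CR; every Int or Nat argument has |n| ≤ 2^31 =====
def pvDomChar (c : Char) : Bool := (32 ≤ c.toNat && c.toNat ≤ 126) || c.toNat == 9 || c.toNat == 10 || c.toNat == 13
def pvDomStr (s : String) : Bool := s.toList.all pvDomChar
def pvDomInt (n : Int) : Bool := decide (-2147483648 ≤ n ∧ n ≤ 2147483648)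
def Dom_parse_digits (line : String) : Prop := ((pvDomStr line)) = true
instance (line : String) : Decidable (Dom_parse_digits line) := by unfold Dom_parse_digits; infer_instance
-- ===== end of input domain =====

-- B replaces A's per-index scan over the nine spelled words with a single precompiled
-- zero-width-lookahead regex scanned once by re.finditer (idiomatic; same return value).

-- ===== PORT A =====
-- WORD_TO_DIGIT, the module-level dict
def pvWTD : PySem.Dict String String := PySem.Dict.ofList
  [("one","1"),("two","2"),("three","3"),("four","4"),("five","5"),
   ("six","6"),("seven","7"),("eight","8"),("nine","9")]

def parse_digits (line : String) : String :=
  (PySem.List.pyRange 0 (PySem.Str.len line) 1).foldl (fun digits i =>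
    match PySem.Str.pyGet? line i with          -- char = line[i] (i always in range)
    | none => digits
    | some char =>
      if PySem.Chars.isdigit char then digits.push char
      else pvWTD.keys.foldl (fun d word =>
        if PySem.Str.startswith (PySem.Str.slice line (some i) none) word = true
        then d ++ pvWTD.getD word "" else d) digits) ""

-- ===== PORT B =====
-- the regex alternation (\d | one | … | nine), in pattern order
def pvAlts : List String := ["one","two","three","four","five","six","seven","eight","nine"]

-- group(1) of the lookahead at this position, if the lookahead matches
def pvGroup (c : Char) (rest : List Char) : Option String :=
  if PySem.Chars.isdigit c then some (String.ofList [c])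
  else pvAlts.find? (fun w => PySem.Chars.startswith (c :: rest) w.toList)

-- re.finditer of the zero-width pattern: one attempt per position, left to right
def pvFinditer : List Char → List String
  | [] => []
  | c :: rest =>
    match pvGroup c rest with
    | some g => g :: pvFinditer rest
    | none => pvFinditer rest

def parse_digits_alt (line : String) : String :=
  PySem.Str.join "" ((pvFinditer line.toList).map (fun g => pvWTD.getD g g))

-- ===== PRECONDITION & SPEC =====
def Spec_parse_digits (line : String) (out : String) : Prop := out = parse_digits_alt line
instance (line : String) (out : String) : Decidable (Spec_parse_digits line out) := by unfold Spec_parse_digits; infer_instance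

-- ===== CLAIM (what is proved, stated in full; the proofs are below) =====
def Claim_equal_parse_digits : Prop := ∀ (line : String), Dom_parse_digits line → Spec_parse_digits line (parse_digits line)

-- ===== LEMMAS AND PROOFS =====

-- pvWTD with its items spelled out
lemma wtd_items : pvWTD = PySem.Dict.mk
  [("one","1"),("two","2"),("three","3"),("four","4"),("five","5"),
   ("six","6"),("seven","7"),("eight","8"),("nine","9")] := by decide

-- A's loop body at one position, as a function of the suffix line[i:]
def aStep (digits : String) (s : List Char) : String :=
  match s with
  | [] => digits
  | char :: _ =>
    if PySem.Chars.isdigit char then digits.push char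
    else pvWTD.keys.foldl (fun d word =>
      if PySem.Chars.startswith s word.toList = true then d ++ pvWTD.getD word "" else d) digits

-- a left fold whose body sees the whole remaining suffix
def dropGo {β : Type} (F : β → List Char → β) : List Char → β → β
  | [], acc => acc
  | c :: t, acc => dropGo F t (F acc (c :: t))

-- the characters B contributes, per position
def bChars (xs : List Char) : List Char :=
  ((pvFinditer xs).map (fun g => (pvWTD.getD g g).toList)).flatten


-- toList of the nine word literals
lemma tl1 : "one".toList = ['o','n','e'] := rfl
lemma tl2 : "two".toList = ['t','w','o'] := rfl
lemma tl3 : "three".toList = ['t','h','r','e','e'] := rfl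
lemma tl4 : "four".toList = ['f','o','u','r'] := rfl
lemma tl5 : "five".toList = ['f','i','v','e'] := rfl
lemma tl6 : "six".toList = ['s','i','x'] := rfl
lemma tl7 : "seven".toList = ['s','e','v','e','n'] := rfl
lemma tl8 : "eight".toList = ['e','i','g','h','t'] := rfl
lemma tl9 : "nine".toList = ['n','i','n','e'] := rfl

-- a one-character string is never a key of WORD_TO_DIGIT
lemma getD_single (c : Char) : pvWTD.getD (String.ofList [c]) (String.ofList [c]) = String.ofList [c] := by
  have h : ∀ w : String, w.toList.length ≠ 1 → (w == String.ofList [c]) = false := by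
    intro w hw; simp only [beq_eq_false_iff_ne]; intro he; apply hw; rw [he]; simp
  rw [wtd_items]
  simp [PySem.Dict.getD, PySem.Dict.get?,
    h "one" (by decide), h "two" (by decide), h "three" (by decide), h "four" (by decide),
    h "five" (by decide), h "six" (by decide), h "seven" (by decide), h "eight" (by decide),
    h "nine" (by decide)]

-- at one position, A appends exactly the characters B contributes there
lemma perPos (acc : String) (c : Char) (t : List Char) :
    (aStep acc (c :: t)).toList
      = acc.toList ++ (match pvGroup c t with
                       | some g => (pvWTD.getD g g).toList
                       | none => []) := by
  by_cases hd : PySem.Chars.isdigit c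
  · simp [aStep, pvGroup, hd, getD_single]
  · by_cases h1 : PySem.Chars.startswith (c :: t) ['o','n','e'] = true
    · rw [PySem.Chars.startswith_iff] at h1; obtain ⟨r, hr⟩ := h1
      injection hr with hc ht; subst hc; subst ht
      simp [aStep, pvGroup, pvAlts, hd, wtd_items, PySem.Chars.startswith, List.isPrefixOf, tl1, tl2, tl3, tl4, tl5, tl6, tl7, tl8, tl9]  <;> decide
    · by_cases h2 : PySem.Chars.startswith (c :: t) ['t','w','o'] = true
      · rw [PySem.Chars.startswith_iff] at h2; obtain ⟨r, hr⟩ := h2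
        injection hr with hc ht; subst hc; subst ht
        simp [aStep, pvGroup, pvAlts, hd, wtd_items, PySem.Chars.startswith, List.isPrefixOf, tl1, tl2, tl3, tl4, tl5, tl6, tl7, tl8, tl9]  <;> decide
      · by_cases h3 : PySem.Chars.startswith (c :: t) ['t','h','r','e','e'] = true
        · rw [PySem.Chars.startswith_iff] at h3; obtain ⟨r, hr⟩ := h3
          injection hr with hc ht; subst hc; subst ht
          simp [aStep, pvGroup, pvAlts, hd, wtd_items, PySem.Chars.startswith, List.isPrefixOf, tl1, tl2, tl3, tl4, tl5, tl6, tl7, tl8, tl9] <;> decide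
        · by_cases h4 : PySem.Chars.startswith (c :: t) ['f','o','u','r'] = true
          · rw [PySem.Chars.startswith_iff] at h4; obtain ⟨r, hr⟩ := h4
            injection hr with hc ht; subst hc; subst ht
            simp [aStep, pvGroup, pvAlts, hd, wtd_items, PySem.Chars.startswith, List.isPrefixOf, tl1, tl2, tl3, tl4, tl5, tl6, tl7, tl8, tl9]  <;> decide
          · by_cases h5 : PySem.Chars.startswith (c :: t) ['f','i','v','e'] = true
            · rw [PySem.Chars.startswith_iff] at h5; obtain ⟨r, hr⟩ := h5
              injection hr with hc ht; subst hc; subst ht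
              simp [aStep, pvGroup, pvAlts, hd, wtd_items, PySem.Chars.startswith, List.isPrefixOf, tl1, tl2, tl3, tl4, tl5, tl6, tl7, tl8, tl9]  <;> decide
            · by_cases h6 : PySem.Chars.startswith (c :: t) ['s','i','x'] = true
              · rw [PySem.Chars.startswith_iff] at h6; obtain ⟨r, hr⟩ := h6
                injection hr with hc ht; subst hc; subst ht
                simp [aStep, pvGroup, pvAlts, hd, wtd_items, PySem.Chars.startswith, List.isPrefixOf, tl1, tl2, tl3, tl4, tl5, tl6, tl7, tl8, tl9]  <;> decide
              · by_cases h7 : PySem.Chars.startswith (c :: t) ['s','e','v','e','n'] = true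
                · rw [PySem.Chars.startswith_iff] at h7; obtain ⟨r, hr⟩ := h7
                  injection hr with hc ht; subst hc; subst ht
                  simp [aStep, pvGroup, pvAlts, hd, wtd_items, PySem.Chars.startswith, List.isPrefixOf, tl1, tl2, tl3, tl4, tl5, tl6, tl7, tl8, tl9]  <;> decide
                · by_cases h8 : PySem.Chars.startswith (c :: t) ['e','i','g','h','t'] = true
                  · rw [PySem.Chars.startswith_iff] at h8; obtain ⟨r, hr⟩ := h8
                    injection hr with hc ht; subst hc; subst ht
                    simp [aStep, pvGroup, pvAlts, hd, wtd_items, PySem.Chars.startswith, List.isPrefixOf, tl1, tl2, tl3, tl4, tl5, tl6, tl7, tl8, tl9]  <;> decide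
                  · by_cases h9 : PySem.Chars.startswith (c :: t) ['n','i','n','e'] = true
                    · rw [PySem.Chars.startswith_iff] at h9; obtain ⟨r, hr⟩ := h9
                      injection hr with hc ht; subst hc; subst ht
                      simp [aStep, pvGroup, pvAlts, hd, wtd_items, PySem.Chars.startswith, List.isPrefixOf, tl1, tl2, tl3, tl4, tl5, tl6, tl7, tl8, tl9]  <;> decide
                    · simp [aStep, pvGroup, pvAlts, hd, wtd_items,
                            tl1, tl2, tl3, tl4, tl5, tl6, tl7, tl8, tl9,
                            h1, h2, h3, h4, h5, h6, h7, h8, h9]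

-- A's loop, re-based on suffixes
lemma foldl_range_drop {β : Type} (F : β → List Char → β) (xs : List Char) (acc : β) :
    (List.range xs.length).foldl (fun a k => F a (xs.drop k)) acc = dropGo F xs acc := by
  induction xs generalizing acc with
  | nil => simp [dropGo]
  | cons c t ih =>
    rw [List.length_cons, List.range_succ_eq_map]
    simp only [List.foldl_cons, List.foldl_map, List.drop_zero, List.drop_succ_cons]
    exact ih (F acc (c :: t))

lemma A_as_dropGo (line : String) : parse_digits line = dropGo aStep line.toList "" := by
  unfold parse_digits
  rw [show PySem.Str.len line = (line.toList.length : Int) from by simp,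
      PySem.List.pyRange_zero_nat, List.foldl_map]
  rw [← foldl_range_drop aStep line.toList ""]
  apply PySem.List.foldl_congr_mem
  intro acc k _
  simp only [aStep, PySem.Str.startswith_eq, PySem.Str.toList_slice,
    PySem.Chars.slice_eq_listSlice, PySem.List.slice_from_natCast,
    PySem.Str.pyGet?_natCast, ← List.head?_drop]
  cases h : (line.toList.drop k).head? with
  | none =>
    rw [List.head?_eq_none_iff] at h
    rw [h]
  | some ch =>
    obtain ⟨u, hu⟩ : ∃ u, line.toList.drop k = ch :: u := by
      cases hdrop : line.toList.drop k with
      | nil => rw [hdrop] at h; simp at h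
      | cons a u => rw [hdrop] at h; simp at h; exact ⟨u, by rw [h]⟩
    rw [hu]

-- B, at the character level
lemma B_as_bChars (line : String) : (parse_digits_alt line).toList = bChars line.toList := by
  unfold parse_digits_alt bChars
  rw [PySem.Str.toList_join]
  have hj : ∀ l : List (List Char), PySem.Chars.join [] l = l.flatten := by
    intro l
    simp [PySem.Chars.join, List.intercalate]
    induction l with
    | nil => rfl
    | cons a t ih => cases t <;> simp_all [List.intersperse]
  rw [show ("" : String).toList = [] from rfl, hj, List.map_map]
  rfl

-- the two sides agree on every suffix
lemma main_lemma (xs : List Char) : ∀ acc : String,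
    (dropGo aStep xs acc).toList = acc.toList ++ bChars xs := by
  induction xs with
  | nil => intro acc; simp [dropGo, bChars, pvFinditer]
  | cons c t ih =>
    intro acc
    have hf : pvFinditer (c :: t) = (match pvGroup c t with
        | some g => g :: pvFinditer t
        | none => pvFinditer t) := by rw [pvFinditer]
    rw [dropGo, ih (aStep acc (c :: t)), perPos]
    cases hg : pvGroup c t <;> simp [bChars, hf, hg]

-- ===== VERDICT (by name: the statement is the Claim_ definition above) =====
theorem parse_digits_spec : Claim_equal_parse_digits := by
  intro line _
  unfold Spec_parse_digits
  apply String.toList_inj.mp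
  rw [A_as_dropGo, B_as_bChars, main_lemma]
  rfl
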